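-- pv_equiv track=rewrite | github.com/dimasliu123/retail-dashboard | utils.py | segmentRFMClass
-- ===== SOURCE A (Python) =====
-- def segmentRFMClass(R, F):
--     segment = []
--     for i in range(len(R)):
--         if R[i] == 1 and F[i] == 1:
--             segment.append("Hibernating")
--         elif (R[i] == 1 and F[i] == 2) or (R[i] == 2 and F[i] == 2) or (R[i] == 2 and F[i] == 1):
--             segment.append("At Risk")
--         elif R[i] == 1 and F[i] == 4 :
--             segment.append("Can't Lose")
--         elif R[i] == 2 and F[i] == 2 :
--             segment.append("Needs Attention")
--         elif (R[i] == 2 and F[i] == 3) or (R[i] == 2 and F[i] == 4):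
--             segment.append("Potential Loyalist")
--         elif (R[i] == 4 and F[i] == 2) or (R[i] == 4 and F[i] == 1):
--             segment.append("Promising")
--         elif R[i] == 3 and F[i] == 3:
--             segment.append("Loyal")
--         elif R[i] == 4 and F[i] == 4:
--             segment.append("Champion")
--         else :
--             segment.append("Nothing")
--     return segment
-- ===== SOURCE B (Python) =====
-- _RULES = [
--     ("Hibernating", [(1, 1)]),
--     ("At Risk", [(1, 2), (2, 2), (2, 1)]),
--     ("Can't Lose", [(1, 4)]),
--     ("Potential Loyalist", [(2, 3), (2, 4)]),
--     ("Promising", [(4, 2), (4, 1)]),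
--     ("Loyal", [(3, 3)]),
--     ("Champion", [(4, 4)]),
-- ]
--
-- def segmentRFMClass(R, F):
--     # Stamping approach: pre-fill the answer with the default, then make one
--     # pass over the data PER LABEL RULE, overwriting the slots that match it.
--     # The (r, f) pairs are pairwise disjoint, so pass order does not matter.
--     segment = ["Nothing"] * len(R)
--     for label, pairs in _RULES:
--         for r, f in pairs:
--             for i in range(len(R)):
--                 if R[i] == r and F[i] == f:
--                     segment[i] = label
--     return segment
-- ===== Notes on version B (the rewrite author's own statement) =====
-- stated objective: alternative
-- what changed: Instead of one element-major pass through a nine-branch if/elif chain, B pre-fills the output with 'Nothing' and runs one stamping pass per (r,f) rule (label-major traversal), overwriting matching slots; this is correct because the rule pairs are pairwise disjoint so at most one pass touches each slot, the unreachable 'Needs Attention' branch is dropped and (2,2) keeps its first-match label 'At Risk'.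
import Mathlib
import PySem

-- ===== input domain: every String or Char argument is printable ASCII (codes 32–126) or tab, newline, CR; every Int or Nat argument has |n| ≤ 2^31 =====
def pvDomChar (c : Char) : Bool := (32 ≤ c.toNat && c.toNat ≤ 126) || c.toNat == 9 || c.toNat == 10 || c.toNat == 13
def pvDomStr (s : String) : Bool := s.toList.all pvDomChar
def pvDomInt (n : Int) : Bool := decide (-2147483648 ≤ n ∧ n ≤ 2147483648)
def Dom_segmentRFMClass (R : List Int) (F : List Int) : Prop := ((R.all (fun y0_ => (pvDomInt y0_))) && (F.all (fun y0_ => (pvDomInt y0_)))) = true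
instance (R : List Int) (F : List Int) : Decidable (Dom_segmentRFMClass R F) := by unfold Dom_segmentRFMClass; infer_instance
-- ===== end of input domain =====

-- B replaces A's single element-major pass through a nine-branch if/elif chain by a
-- label-major stamping scheme: the output is pre-filled with "Nothing" and one pass per
-- (r,f) rule overwrites the matching slots (rule pairs are disjoint, so order is moot).

-- ===== PORT A =====
def segmentRFMClass (R : List Int) (F : List Int) : List String :=
  (PySem.List.pyRange 0 R.length 1).foldl (fun segment i =>
    let r := PySem.List.pyGetD R i 0
    let f := PySem.List.pyGetD F i 0
    if r = 1 ∧ f = 1 then segment ++ ["Hibernating"]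
    else if (r = 1 ∧ f = 2) ∨ (r = 2 ∧ f = 2) ∨ (r = 2 ∧ f = 1) then segment ++ ["At Risk"]
    else if r = 1 ∧ f = 4 then segment ++ ["Can't Lose"]
    else if r = 2 ∧ f = 2 then segment ++ ["Needs Attention"]
    else if (r = 2 ∧ f = 3) ∨ (r = 2 ∧ f = 4) then segment ++ ["Potential Loyalist"]
    else if (r = 4 ∧ f = 2) ∨ (r = 4 ∧ f = 1) then segment ++ ["Promising"]
    else if r = 3 ∧ f = 3 then segment ++ ["Loyal"]
    else if r = 4 ∧ f = 4 then segment ++ ["Champion"]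
    else segment ++ ["Nothing"]) []

-- ===== PORT B =====
def rfmRules : List (String × List (Int × Int)) :=
  [("Hibernating", [(1, 1)]),
   ("At Risk", [(1, 2), (2, 2), (2, 1)]),
   ("Can't Lose", [(1, 4)]),
   ("Potential Loyalist", [(2, 3), (2, 4)]),
   ("Promising", [(4, 2), (4, 1)]),
   ("Loyal", [(3, 3)]),
   ("Champion", [(4, 4)])]

-- one inner stamping pass ('for i in range(len(R)): if R[i]==r and F[i]==f: segment[i]=label');
-- the write 'segment[i] = label' is exact as List.set i.toNat since i ∈ range(len(segment))
def stampPass (R F : List Int) (r f : Int) (label : String) (segment : List String) : List String :=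
  (PySem.List.pyRange 0 R.length 1).foldl (fun seg i =>
    if PySem.List.pyGetD R i 0 = r ∧ PySem.List.pyGetD F i 0 = f
    then seg.set i.toNat label else seg) segment

def segmentRFMClass_alt (R : List Int) (F : List Int) : List String :=
  rfmRules.foldl (fun segment rule =>
    rule.2.foldl (fun segment p => stampPass R F p.1 p.2 rule.1 segment) segment)
    (List.replicate R.length "Nothing")

-- ===== PRECONDITION & SPEC =====
-- Pre_ excludes exactly the inputs on which Python A raises IndexError: an index j with
-- F[j] missing but R[j] ∈ {1,2,3,4}, so A's short-circuited conditions do evaluate F[j].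
def Pre_segmentRFMClass (R : List Int) (F : List Int) : Prop :=
  ∀ j ∈ List.range R.length,
    j < F.length ∨ (R.getD j 0 ≠ 1 ∧ R.getD j 0 ≠ 2 ∧ R.getD j 0 ≠ 3 ∧ R.getD j 0 ≠ 4)
instance (R : List Int) (F : List Int) : Decidable (Pre_segmentRFMClass R F) := by
  unfold Pre_segmentRFMClass; infer_instance
def pvWitness_segmentRFMClass : List Int × List Int := ([1, 2, 7], [1, 3])

def Spec_segmentRFMClass (R : List Int) (F : List Int) (out : List String) : Prop := out = segmentRFMClass_alt R F
instance (R : List Int) (F : List Int) (out : List String) : Decidable (Spec_segmentRFMClass R F out) := by unfold Spec_segmentRFMClass; infer_instance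

-- ===== CLAIM (what is proved, stated in full; the proofs are below) =====
def Claim_equal_segmentRFMClass : Prop := ∀ (R : List Int) (F : List Int), Dom_segmentRFMClass R F → Pre_segmentRFMClass R F → Spec_segmentRFMClass R F (segmentRFMClass R F)

-- ===== LEMMAS AND PROOFS =====

-- A's if/elif chain, branch order intact, as a value-producing function
def branchChain (r f : Int) : String :=
  if r = 1 ∧ f = 1 then "Hibernating"
  else if (r = 1 ∧ f = 2) ∨ (r = 2 ∧ f = 2) ∨ (r = 2 ∧ f = 1) then "At Risk"
  else if r = 1 ∧ f = 4 then "Can't Lose"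
  else if r = 2 ∧ f = 2 then "Needs Attention"
  else if (r = 2 ∧ f = 3) ∨ (r = 2 ∧ f = 4) then "Potential Loyalist"
  else if (r = 4 ∧ f = 2) ∨ (r = 4 ∧ f = 1) then "Promising"
  else if r = 3 ∧ f = 3 then "Loyal"
  else if r = 4 ∧ f = 4 then "Champion"
  else "Nothing"

-- A's loop body is "append one element computed by the branch chain"
theorem A_eq_map (R F : List Int) :
    segmentRFMClass R F = (PySem.List.pyRange 0 R.length 1).map
      (fun i => branchChain (PySem.List.pyGetD R i 0) (PySem.List.pyGetD F i 0)) := by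
  unfold segmentRFMClass
  have hbody : (fun (segment : List String) (i : Int) =>
      let r := PySem.List.pyGetD R i 0
      let f := PySem.List.pyGetD F i 0
      if r = 1 ∧ f = 1 then segment ++ ["Hibernating"]
      else if (r = 1 ∧ f = 2) ∨ (r = 2 ∧ f = 2) ∨ (r = 2 ∧ f = 1) then segment ++ ["At Risk"]
      else if r = 1 ∧ f = 4 then segment ++ ["Can't Lose"]
      else if r = 2 ∧ f = 2 then segment ++ ["Needs Attention"]
      else if (r = 2 ∧ f = 3) ∨ (r = 2 ∧ f = 4) then segment ++ ["Potential Loyalist"]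
      else if (r = 4 ∧ f = 2) ∨ (r = 4 ∧ f = 1) then segment ++ ["Promising"]
      else if r = 3 ∧ f = 3 then segment ++ ["Loyal"]
      else if r = 4 ∧ f = 4 then segment ++ ["Champion"]
      else segment ++ ["Nothing"])
      = fun segment i =>
          segment ++ [branchChain (PySem.List.pyGetD R i 0) (PySem.List.pyGetD F i 0)] := by
    funext segment i
    simp only [branchChain]
    split_ifs <;> rfl
  rw [hbody, PySem.List.foldl_append_singleton_eq_map]
  simp

-- a Nat-indexed stamping pass preserves the length of the buffer
theorem foldl_set_length (c : Nat → Bool) (lab : String) (L : List Nat) (s : List String) :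
    (L.foldl (fun t k => if c k then t.set k lab else t) s).length = s.length := by
  induction L generalizing s with
  | nil => rfl
  | cons a L ih =>
    simp only [List.foldl_cons]
    by_cases h : c a <;> simp [h, ih]

theorem foldl_set_getElem? (c : Nat → Bool) (lab : String) (s : List String) (n : Nat) (j : Nat) :
    n ≤ s.length →
    ((List.range n).foldl (fun t k => if c k then t.set k lab else t) s)[j]?
      = if j < n ∧ c j then some lab else s[j]? := by
  induction n with
  | zero => intro _; simp
  | succ m ih =>
    intro hn
    have hm : m ≤ s.length := by omega
    rw [List.range_succ, List.foldl_append, List.foldl_cons, List.foldl_nil]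
    have hlen : ((List.range m).foldl (fun t k => if c k then t.set k lab else t) s).length
        = s.length := foldl_set_length c lab _ s
    by_cases hc : c m
    · rw [if_pos hc, List.getElem?_set, hlen, ih hm]
      by_cases hj : m = j
      · subst hj
        rw [if_pos rfl, if_pos (by omega), if_pos ⟨by omega, hc⟩]
      · rw [if_neg hj]
        by_cases h1 : j < m ∧ c j = true
        · rw [if_pos h1, if_pos ⟨by omega, h1.2⟩]
        · rw [if_neg h1, if_neg (by rintro ⟨h2, h3⟩; exact h1 ⟨by omega, h3⟩)]
    · rw [if_neg hc, ih hm]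
      by_cases hj : m = j
      · subst hj; simp [hc]
      · by_cases h1 : j < m ∧ c j = true
        · rw [if_pos h1, if_pos ⟨by omega, h1.2⟩]
        · rw [if_neg h1, if_neg (by rintro ⟨h2, h3⟩; exact h1 ⟨by omega, h3⟩)]

theorem stampPass_eq_nat (R F : List Int) (r f : Int) (lab : String) (s : List String) :
    stampPass R F r f lab s
      = (List.range R.length).foldl (fun (t : List String) (k : Nat) =>
          if decide (PySem.List.pyGetD R (k : Int) 0 = r ∧ PySem.List.pyGetD F (k : Int) 0 = f)
          then t.set k lab else t) s := by
  unfold stampPass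
  rw [PySem.List.pyRange_one, List.foldl_map]
  simp only [zero_add, Int.sub_zero, Int.toNat_natCast, decide_eq_true_eq]

theorem stampPass_length (R F : List Int) (r f : Int) (lab : String) (s : List String) :
    (stampPass R F r f lab s).length = s.length := by
  rw [stampPass_eq_nat]; exact foldl_set_length _ _ _ _

theorem stampPass_getElem? (R F : List Int) (r f : Int) (lab : String) (s : List String)
    (hs : R.length ≤ s.length) (j : Nat) :
    (stampPass R F r f lab s)[j]?
      = if j < R.length ∧ PySem.List.pyGetD R (j : Int) 0 = r ∧ PySem.List.pyGetD F (j : Int) 0 = f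
        then some lab else s[j]? := by
  rw [stampPass_eq_nat, foldl_set_getElem? _ _ _ _ _ hs]
  by_cases h : j < R.length ∧ PySem.List.pyGetD R (j:Int) 0 = r ∧ PySem.List.pyGetD F (j:Int) 0 = f
  · rw [if_pos ⟨h.1, by simpa using h.2⟩, if_pos h]
  · rw [if_neg (by rintro ⟨h1, h2⟩; exact h ⟨h1, by simpa using h2⟩), if_neg h]

-- the stamping chain at one slot equals A's branch chain, for every (r, f)
set_option maxHeartbeats 2000000 in
theorem optChain_eq (r f : Int) :
    (if r = 4 ∧ f = 4 then some "Champion"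
     else if r = 3 ∧ f = 3 then some "Loyal"
     else if r = 4 ∧ f = 1 then some "Promising"
     else if r = 4 ∧ f = 2 then some "Promising"
     else if r = 2 ∧ f = 4 then some "Potential Loyalist"
     else if r = 2 ∧ f = 3 then some "Potential Loyalist"
     else if r = 1 ∧ f = 4 then some "Can't Lose"
     else if r = 2 ∧ f = 1 then some "At Risk"
     else if r = 2 ∧ f = 2 then some "At Risk"
     else if r = 1 ∧ f = 2 then some "At Risk"
     else if r = 1 ∧ f = 1 then some "Hibernating"
     else some "Nothing") = some (branchChain r f) := by
  unfold branchChain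
  split_ifs <;> first | rfl | (exfalso; omega)

-- B's result, elementwise: the eleven stamping passes compose into the reverse rule chain
theorem B_getElem? (R F : List Int) (j : Nat) (hj : j < R.length) :
    (segmentRFMClass_alt R F)[j]?
      = some (branchChain (PySem.List.pyGetD R (j : Int) 0) (PySem.List.pyGetD F (j : Int) 0)) := by
  unfold segmentRFMClass_alt rfmRules
  simp only [List.foldl_cons, List.foldl_nil]
  rw [stampPass_getElem? _ _ _ _ _ _ (by simp [stampPass_length]),
      stampPass_getElem? _ _ _ _ _ _ (by simp [stampPass_length]),
      stampPass_getElem? _ _ _ _ _ _ (by simp [stampPass_length]),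
      stampPass_getElem? _ _ _ _ _ _ (by simp [stampPass_length]),
      stampPass_getElem? _ _ _ _ _ _ (by simp [stampPass_length]),
      stampPass_getElem? _ _ _ _ _ _ (by simp [stampPass_length]),
      stampPass_getElem? _ _ _ _ _ _ (by simp [stampPass_length]),
      stampPass_getElem? _ _ _ _ _ _ (by simp [stampPass_length]),
      stampPass_getElem? _ _ _ _ _ _ (by simp [stampPass_length]),
      stampPass_getElem? _ _ _ _ _ _ (by simp [stampPass_length]),
      stampPass_getElem? _ _ _ _ _ _ (by simp)]
  rw [List.getElem?_replicate, if_pos hj]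
  simp only [hj, true_and]
  exact optChain_eq _ _

@[simp]
theorem B_length (R F : List Int) : (segmentRFMClass_alt R F).length = R.length := by
  unfold segmentRFMClass_alt rfmRules
  simp only [List.foldl_cons, List.foldl_nil, stampPass_length, List.length_replicate]

-- ===== VERDICT (by name: the statement is the Claim_ definition above) =====
theorem segmentRFMClass_spec : Claim_equal_segmentRFMClass := by
  intro R F _ _
  unfold Spec_segmentRFMClass
  rw [A_eq_map]
  apply List.ext_getElem?
  intro j
  by_cases hj : j < R.length
  · rw [B_getElem? R F j hj]
    rw [PySem.List.getElem?_map_pyRange_zero _ _ _ hj]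
  · rw [List.getElem?_eq_none, List.getElem?_eq_none]
    · simpa using hj
    · simpa using hj
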